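-- pv_equiv track=rewrite | github.com/keiqkeqi321/somnia | open_somnia/tools/filesystem.py | _find_first_brace_group
-- ===== SOURCE A (Python) =====
-- def _split_brace_alternatives(pattern: str) -> list[str]:
--     alternatives: list[str] = []
--     current: list[str] = []
--     depth = 0
--     escaped = False
--     for char in pattern:
--         if escaped:
--             current.append(char)
--             escaped = False
--             continue
--         if char == "\\":
--             current.append(char)
--             escaped = True
--             continue
--         if char == "," and depth == 0:
--             alternatives.append("".join(current))
--             current = []
--             continue
--         if char == "{":
--             depth += 1
--         elif char == "}" and depth > 0:
--             depth -= 1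
--         current.append(char)
--     alternatives.append("".join(current))
--     return alternatives
--
-- def _find_first_brace_group(pattern: str) -> tuple[int, int, list[str]] | None:
--     start: int | None = None
--     depth = 0
--     escaped = False
--     for index, char in enumerate(pattern):
--         if escaped:
--             escaped = False
--             continue
--         if char == "\\":
--             escaped = True
--             continue
--         if char == "{":
--             if depth == 0:
--                 start = index
--             depth += 1
--             continue
--         if char == "}" and depth > 0:
--             depth -= 1
--             if depth == 0 and start is not None:
--                 inner = pattern[start + 1 : index]
--                 alternatives = _split_brace_alternatives(inner)
--                 if len(alternatives) > 1:
--                     return start, index, alternatives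
--                 start = None
--     return None
-- ===== SOURCE B (Python) =====
-- def _find_first_brace_group(pattern: str) -> tuple[int, int, list[str]] | None:
--     depth = 0
--     escaped = False
--     start = 0
--     alternatives: list[str] = []
--     current: list[str] = []
--     for index, char in enumerate(pattern):
--         if escaped:
--             escaped = False
--             if depth >= 1:
--                 current.append(char)
--             continue
--         if char == "\\":
--             escaped = True
--             if depth >= 1:
--                 current.append(char)
--             continue
--         if char == "{":
--             if depth == 0:
--                 start = index
--             else:
--                 current.append(char)
--             depth += 1
--             continue
--         if char == "}" and depth > 0:
--             depth -= 1
--             if depth == 0: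
--                 if alternatives:
--                     alternatives.append("".join(current))
--                     return start, index, alternatives
--                 alternatives = []
--                 current = []
--             else:
--                 current.append(char)
--             continue
--         if char == "," and depth == 1:
--             alternatives.append("".join(current))
--             current = []
--             continue
--         if depth >= 1:
--             current.append(char)
--     return None
-- ===== Notes on version B (the rewrite author's own statement) =====
-- stated objective: alternative
-- what changed: B merges brace matching and alternative splitting into one pass that accumulates the alternatives inline, eliminating the _split_brace_alternatives helper and the substring extraction/re-scan A performs at every candidate group.
import Mathlib
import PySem

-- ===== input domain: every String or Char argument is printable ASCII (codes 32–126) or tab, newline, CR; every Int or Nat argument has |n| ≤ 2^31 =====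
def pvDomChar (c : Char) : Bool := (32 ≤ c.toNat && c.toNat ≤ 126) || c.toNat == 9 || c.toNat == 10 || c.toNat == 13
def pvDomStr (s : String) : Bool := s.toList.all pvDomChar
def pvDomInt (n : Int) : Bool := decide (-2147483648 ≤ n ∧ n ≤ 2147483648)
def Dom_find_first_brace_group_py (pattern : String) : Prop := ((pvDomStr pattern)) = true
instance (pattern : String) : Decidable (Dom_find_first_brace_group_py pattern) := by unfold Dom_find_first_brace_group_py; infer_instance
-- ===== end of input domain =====

-- B does in ONE pass what A does with a helper re-scan of each candidate group's
-- substring: the alternatives are accumulated inline while matching braces.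

-- ===== PORT A =====
-- step of _split_brace_alternatives' loop: state = (alternatives, current, depth, escaped)
def splitStep (st : List String × List Char × Int × Bool) (c : Char) :
    List String × List Char × Int × Bool :=
  let (alts, cur, depth, escaped) := st
  if escaped then (alts, cur ++ [c], depth, false)
  else if c = '\\' then (alts, cur ++ [c], depth, true)
  else if c = ',' ∧ depth = 0 then (alts ++ [String.ofList cur], [], depth, false)
  else if c = '{' then (alts, cur ++ [c], depth + 1, false)
  else if c = '}' ∧ depth > 0 then (alts, cur ++ [c], depth - 1, false)
  else (alts, cur ++ [c], depth, false)

def split_brace_alternatives (pattern : String) : List String :=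
  let st := pattern.toList.foldl splitStep ([], [], 0, false)
  st.1 ++ [String.ofList st.2.1]

-- A's loop: full = pattern's chars (for the slice), then remaining chars, index, start, depth, escaped
def findA (full : List Char) : List Char → Nat → Option Nat → Int → Bool →
    Option (Int × Int × List String)
  | [], _, _, _, _ => none
  | c :: rest, i, start, depth, escaped =>
    if escaped then findA full rest (i+1) start depth false
    else if c = '\\' then findA full rest (i+1) start depth true
    else if c = '{' then
      findA full rest (i+1) (if depth = 0 then some i else start) (depth+1) escaped
    else if c = '}' ∧ depth > 0 then
      let depth' := depth - 1
      match start with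
      | some s =>
        if depth' = 0 then
          let inner := PySem.List.slice full (some ((s:Int)+1)) (some (i:Int))
          let alternatives := split_brace_alternatives (String.ofList inner)
          if alternatives.length > 1 then some ((s:Int), (i:Int), alternatives)
          else findA full rest (i+1) none depth' escaped
        else findA full rest (i+1) (some s) depth' escaped
      | none => findA full rest (i+1) none depth' escaped
    else findA full rest (i+1) start depth escaped

def find_first_brace_group_py (pattern : String) : Option (Int × Int × List String) :=
  findA pattern.toList pattern.toList 0 none 0 false

-- ===== PORT B =====
-- B's single loop: remaining chars, index, depth, escaped, start, alternatives, current
def findB : List Char → Nat → Int → Bool → Nat → List String → List Char →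
    Option (Int × Int × List String)
  | [], _, _, _, _, _, _ => none
  | c :: rest, i, depth, escaped, start, alts, cur =>
    if escaped then
      findB rest (i+1) depth false start alts (if depth ≥ 1 then cur ++ [c] else cur)
    else if c = '\\' then
      findB rest (i+1) depth true start alts (if depth ≥ 1 then cur ++ [c] else cur)
    else if c = '{' then
      if depth = 0 then findB rest (i+1) (depth+1) escaped i alts cur
      else findB rest (i+1) (depth+1) escaped start alts (cur ++ [c])
    else if c = '}' ∧ depth > 0 then
      if depth - 1 = 0 then
        if alts ≠ [] then some ((start:Int), (i:Int), alts ++ [String.ofList cur])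
        else findB rest (i+1) (depth-1) escaped start [] []
      else findB rest (i+1) (depth-1) escaped start alts (cur ++ [c])
    else if c = ',' ∧ depth = 1 then
      findB rest (i+1) depth escaped start (alts ++ [String.ofList cur]) []
    else
      findB rest (i+1) depth escaped start alts (if depth ≥ 1 then cur ++ [c] else cur)

def find_first_brace_group_py_alt (pattern : String) : Option (Int × Int × List String) :=
  findB pattern.toList 0 0 false 0 [] []

-- ===== PRECONDITION & SPEC =====
def Spec_find_first_brace_group_py (pattern : String) (out : Option (Int × Int × List String)) : Prop := out = find_first_brace_group_py_alt pattern
instance (pattern : String) (out : Option (Int × Int × List String)) : Decidable (Spec_find_first_brace_group_py pattern out) := by unfold Spec_find_first_brace_group_py; infer_instance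

-- ===== CLAIM (what is proved, stated in full; the proofs are below) =====
def Claim_equal_find_first_brace_group_py : Prop := ∀ (pattern : String), Dom_find_first_brace_group_py pattern → Spec_find_first_brace_group_py pattern (find_first_brace_group_py pattern)

-- ===== LEMMAS AND PROOFS =====

-- invariant tying A's state (startA, depth, escaped) to B's (startB, alts, cur):
-- when a group is open, the fold of splitStep over the inner chars seen so far equals B's buffers.
def GInv (pre : List Char) (startA : Option Nat) (depth : Int) (escaped : Bool)
    (startB : Nat) (alts : List String) (cur : List Char) : Prop :=
  match startA with
  | none => depth = 0 ∧ alts = [] ∧ cur = []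
  | some s => 1 ≤ depth ∧ s = startB ∧ s + 1 ≤ pre.length ∧
      (pre.drop (s+1)).foldl splitStep ([], [], 0, false) = (alts, cur, depth - 1, escaped)

theorem main_lemma : ∀ (rest pre : List Char) (startA : Option Nat) (depth : Int)
    (escaped : Bool) (startB : Nat) (alts : List String) (cur : List Char),
    GInv pre startA depth escaped startB alts cur →
    findA (pre ++ rest) rest pre.length startA depth escaped =
      findB rest pre.length depth escaped startB alts cur := by
  intro rest
  induction rest with
  | nil => intro pre startA depth escaped startB alts cur _; rfl
  | cons c rest ih =>
    intro pre startA depth escaped startB alts cur hInv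
    cases startA with
    | none =>
      obtain ⟨hd0, ha, hc⟩ := hInv
      subst hd0 ha hc
      by_cases he : escaped = true
      · -- escaped character: skipped by both
        subst he
        have H := ih (pre ++ [c]) none 0 false startB [] [] (by simp [GInv])
        simp only [List.append_assoc, List.singleton_append, List.length_append,
          List.length_cons, List.length_nil, Nat.zero_add] at H
        simp only [findA, findB, if_true]
        simpa using H
      · replace he : escaped = false := by cases escaped <;> simp_all
        subst he
        by_cases hb : c = '\\'
        · subst hb
          have H := ih (pre ++ ['\\']) none 0 true startB [] [] (by simp [GInv])
          simp only [List.append_assoc, List.singleton_append, List.length_append,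
            List.length_cons, List.length_nil, Nat.zero_add] at H
          simp [findA, findB]
          simpa using H
        · by_cases ho : c = '{'
          · -- open a group at depth 0
            subst ho
            have H := ih (pre ++ ['{']) (some pre.length) 1 false pre.length [] []
              (by
                refine ⟨by norm_num, rfl, by simp, ?_⟩
                have hd : (pre ++ ['{']).drop (pre.length + 1) = ([] : List Char) := by
                  apply List.drop_eq_nil_of_le; simp
                rw [hd]; rfl)
            simp only [List.append_assoc, List.singleton_append, List.length_append,
              List.length_cons, List.length_nil, Nat.zero_add] at H
            simp [findA, findB, hb]
            simpa using H
          · -- any other char at depth 0 (incl. '}' and ','), both skip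
            have H := ih (pre ++ [c]) none 0 false startB [] [] (by simp [GInv])
            simp only [List.append_assoc, List.singleton_append, List.length_append,
              List.length_cons, List.length_nil, Nat.zero_add] at H
            simp [findA, findB, hb, ho]
            simpa using H
    | some s =>
      obtain ⟨hd1, hsB, hsl, hfold⟩ := hInv
      subst hsB
      have hdropc : ∀ d : Char, (pre ++ [d]).drop (s + 1) = pre.drop (s + 1) ++ [d] :=
        fun d => List.drop_append_of_le_length hsl
      have hfoldc : ∀ d : Char, ((pre ++ [d]).drop (s + 1)).foldl splitStep ([], [], 0, false)
          = splitStep (alts, cur, depth - 1, escaped) d := by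
        intro d; rw [hdropc d, List.foldl_append, hfold]; rfl
      have hslen : ∀ d : Char, s + 1 ≤ (pre ++ [d]).length := by intro d; simp; omega
      have hdpos : (0:Int) < depth := by omega
      by_cases he : escaped = true
      · subst he
        have H := ih (pre ++ [c]) (some s) depth false s alts (cur ++ [c])
          ⟨hd1, rfl, hslen c, by rw [hfoldc c]; rfl⟩
        simp only [List.append_assoc, List.singleton_append, List.length_append,
          List.length_cons, List.length_nil, Nat.zero_add] at H
        simp only [findA, findB, if_true, ge_iff_le, hd1]
        simpa using H
      · replace he : escaped = false := by cases escaped <;> simp_all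
        subst he
        by_cases hb : c = '\\'
        · subst hb
          have H := ih (pre ++ ['\\']) (some s) depth true s alts (cur ++ ['\\'])
            ⟨hd1, rfl, hslen _, by rw [hfoldc _]; rfl⟩
          simp only [List.append_assoc, List.singleton_append, List.length_append,
            List.length_cons, List.length_nil, Nat.zero_add] at H
          simp [findA, findB, hd1]
          simpa using H
        · by_cases ho : c = '{'
          · subst ho
            have hdne : ¬ (depth = 0) := by omega
            have H := ih (pre ++ ['{']) (some s) (depth + 1) false s alts (cur ++ ['{'])
              ⟨by omega, rfl, hslen _, by
                rw [hfoldc _]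
                simp only [splitStep]
                simp⟩
            simp only [List.append_assoc, List.singleton_append, List.length_append,
              List.length_cons, List.length_nil, Nat.zero_add] at H
            simp [findA, findB, hdne]
            simpa using H
          · by_cases hcl : c = '}'
            · -- closing brace, depth > 0
              subst hcl
              by_cases hone : depth = 1
              · subst hone
                -- group closes: A slices and splits, B has the pieces ready
                have hslice : PySem.List.slice (pre ++ '}' :: rest) (some ((s:Int) + 1))
                    (some ((pre.length : Nat) : Int)) = pre.drop (s + 1) := by
                  have h1 : ((s:Int) + 1) = (((s+1 : Nat)) : Int) := by push_cast; ring
                  rw [h1, PySem.List.slice_natCast]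
                  rw [List.drop_append_of_le_length hsl]
                  exact List.take_left' (by simp)
                have halts : split_brace_alternatives (String.ofList (pre.drop (s + 1)))
                    = alts ++ [String.ofList cur] := by
                  unfold split_brace_alternatives
                  simp only [String.toList_ofList]
                  rw [hfold]
                have H := ih (pre ++ ['}']) none 0 false s [] [] (by simp [GInv])
                simp only [List.append_assoc, List.singleton_append, List.length_append,
                  List.length_cons, List.length_nil, Nat.zero_add] at H
                simp only [findA, findB]
                simp only [hslice, halts]
                cases alts with
                | nil => simpa using H
                | cons a l => simp
              · have hd2 : (1:Int) < depth := by omega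
                have hd10 : ¬ (depth - 1 = 0) := by omega
                have H := ih (pre ++ ['}']) (some s) (depth - 1) false s alts (cur ++ ['}'])
                  ⟨by omega, rfl, hslen _, by
                    rw [hfoldc _]
                    simp only [splitStep]
                    simp
                    all_goals omega⟩
                simp only [List.append_assoc, List.singleton_append, List.length_append,
                  List.length_cons, List.length_nil, Nat.zero_add] at H
                simp [findA, findB, hdpos, hd10]
                simpa using H
            · -- not a brace/backslash: comma at depth 1, or any other char
              have hnc : ¬ (c = '}' ∧ (0:Int) < depth) := fun h => hcl h.1
              by_cases hk : c = ',' ∧ depth = 1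
              · obtain ⟨hk1, hk2⟩ := hk
                subst hk1 hk2
                have H := ih (pre ++ [',']) (some s) 1 false s (alts ++ [String.ofList cur]) []
                  ⟨le_refl _, rfl, hslen _, by
                    rw [hfoldc _]
                    simp [splitStep]⟩
                simp only [List.append_assoc, List.singleton_append, List.length_append,
                  List.length_cons, List.length_nil, Nat.zero_add] at H
                simp [findA, findB]
                simpa using H
              · have H := ih (pre ++ [c]) (some s) depth false s alts (cur ++ [c])
                  ⟨hd1, rfl, hslen _, by
                    rw [hfoldc _]
                    simp only [splitStep]
                    have h1 : ¬ (c = ',' ∧ depth - 1 = 0) := by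
                      rintro ⟨h1, h2⟩; exact hk ⟨h1, by omega⟩
                    simp [hb, ho, h1]
                    exact fun h => absurd h hcl⟩
                simp only [List.append_assoc, List.singleton_append, List.length_append,
                  List.length_cons, List.length_nil, Nat.zero_add] at H
                simp [findA, findB, hb, ho, hnc, hk, hd1]
                simpa using H

-- ===== VERDICT (by name: the statement is the Claim_ definition above) =====
theorem find_first_brace_group_py_spec : Claim_equal_find_first_brace_group_py := by
  intro pattern _
  unfold Spec_find_first_brace_group_py find_first_brace_group_py find_first_brace_group_py_alt
  have h := main_lemma pattern.toList [] none 0 false 0 [] [] (by simp [GInv])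
  simpa using h
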